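-- pv_equiv track=rewrite | github.com/RodrigoAroeira/IPC | Python/Avaliações/Avaliação 2/problema1 - luigi.py | compactar_strings
-- ===== SOURCE A (Python) =====
-- def compactar_strings(s1, s2):
--     tamanho_min = min(len(s1), len(s2))
--     letras_compactadas = []
--     for i in range(tamanho_min):
--         par = [s1[i], s2[i]]
--         letras_compactadas.append(par)
--     for i in range(tamanho_min, len(s1)):
--         par = [s1[i], '']
--         letras_compactadas.append(par)
--     for i in range(tamanho_min, len(s2)):
--         par = ['', s2[i]]
--         letras_compactadas.append(par)
--     return letras_compactadas
-- ===== SOURCE B (Python) =====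
-- def compactar_strings(s1, s2):
--     n = max(len(s1), len(s2))
--     return [[s1[i:i+1], s2[i:i+1]] for i in range(n)]
-- ===== Notes on version B (the rewrite author's own statement) =====
-- stated objective: simpler
-- what changed: A's three region-specific loops (common prefix, s1 tail padded with '', s2 tail padded with '') are replaced by a single comprehension over range(max(len(s1), len(s2))) that uses one-character slices s[i:i+1], which yield '' past the end and so supply the padding.
import Mathlib
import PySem

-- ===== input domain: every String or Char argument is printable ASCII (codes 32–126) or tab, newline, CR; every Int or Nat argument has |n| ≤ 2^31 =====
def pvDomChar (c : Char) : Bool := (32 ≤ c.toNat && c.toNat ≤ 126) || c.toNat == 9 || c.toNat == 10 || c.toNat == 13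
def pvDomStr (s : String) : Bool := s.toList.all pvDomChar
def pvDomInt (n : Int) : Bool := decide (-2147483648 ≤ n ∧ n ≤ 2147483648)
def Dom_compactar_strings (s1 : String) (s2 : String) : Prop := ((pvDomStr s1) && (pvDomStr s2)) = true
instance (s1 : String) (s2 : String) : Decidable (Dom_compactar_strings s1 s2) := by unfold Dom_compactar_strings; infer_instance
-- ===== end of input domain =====

-- B replaces A's three region-specific loops by one comprehension over range(max(len(s1), len(s2)))
-- using one-character slices s[i:i+1] whose clamping supplies the '' padding (objective: simpler).

-- ===== PORT A =====
-- s[i] in Python yields a one-character string; all loop indices are in range, so pyGetD's default is never read.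
def compactar_strings (s1 : String) (s2 : String) : List (List String) :=
  let l1 := s1.toList
  let l2 := s2.toList
  let tamanho_min : Int := min (PySem.Str.len s1) (PySem.Str.len s2)
  let acc := (PySem.List.pyRange 0 tamanho_min 1).foldl
    (fun acc i => acc ++ [[String.ofList [PySem.List.pyGetD l1 i ' '],
                           String.ofList [PySem.List.pyGetD l2 i ' ']]]) []
  let acc := (PySem.List.pyRange tamanho_min (PySem.Str.len s1) 1).foldl
    (fun acc i => acc ++ [[String.ofList [PySem.List.pyGetD l1 i ' '], ""]]) acc
  (PySem.List.pyRange tamanho_min (PySem.Str.len s2) 1).foldl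
    (fun acc i => acc ++ [["", String.ofList [PySem.List.pyGetD l2 i ' ']]]) acc

-- ===== PORT B =====
def compactar_strings_alt (s1 : String) (s2 : String) : List (List String) :=
  let l1 := s1.toList
  let l2 := s2.toList
  let n : Int := max (PySem.Str.len s1) (PySem.Str.len s2)
  (PySem.List.pyRange 0 n 1).map (fun i =>
    [String.ofList (PySem.List.slice l1 (some i) (some (i + 1))),
     String.ofList (PySem.List.slice l2 (some i) (some (i + 1)))])

-- ===== PRECONDITION & SPEC =====
def Spec_compactar_strings (s1 : String) (s2 : String) (out : List (List String)) : Prop := out = compactar_strings_alt s1 s2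
instance (s1 : String) (s2 : String) (out : List (List String)) : Decidable (Spec_compactar_strings s1 s2 out) := by unfold Spec_compactar_strings; infer_instance

-- ===== CLAIM (what is proved, stated in full; the proofs are below) =====
def Claim_equal_compactar_strings : Prop := ∀ (s1 : String) (s2 : String), Dom_compactar_strings s1 s2 → Spec_compactar_strings s1 s2 (compactar_strings s1 s2)

-- ===== LEMMAS AND PROOFS =====

-- the one-character slice l[j:j+1]: [l[j]] inside the list, [] past the end
theorem slice_one_of_lt (l : List Char) (j : Nat) (h : j < l.length) :
    PySem.List.slice l (some (j : Int)) (some ((j : Int) + 1)) = [l[j]] := by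
  have h1 : ((j : Int) + 1) = ((j + 1 : Nat) : Int) := by push_cast; ring
  rw [h1, PySem.List.slice_natCast]
  simp [List.take_one, List.head?_drop, List.getElem?_eq_getElem h]

theorem slice_one_of_ge (l : List Char) (j : Nat) (h : l.length ≤ j) :
    PySem.List.slice l (some (j : Int)) (some ((j : Int) + 1)) = [] := by
  have h1 : ((j : Int) + 1) = ((j + 1 : Nat) : Int) := by push_cast; ring
  rw [h1, PySem.List.slice_natCast, List.drop_eq_nil_iff.mpr (by omega)]
  simp

-- total equality of the two ports (no hypothesis on the strings needed)
theorem compactar_eq (s1 s2 : String) : compactar_strings s1 s2 = compactar_strings_alt s1 s2 := by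
  unfold compactar_strings compactar_strings_alt
  simp only [PySem.Str.len_eq, PySem.List.foldl_append_singleton_eq_map, List.nil_append]
  rcases le_total s1.toList.length s2.toList.length with h | h
  · have hm : min ((s1.toList.length : Int)) ((s2.toList.length : Int)) = s1.toList.length := by omega
    have hn : max ((s1.toList.length : Int)) ((s2.toList.length : Int)) = s2.toList.length := by omega
    rw [hm, hn, PySem.List.pyRange_one_eq_nil (le_refl _), List.map_nil, List.append_nil,
        PySem.List.pyRange_one_append 0 (s1.toList.length) (s2.toList.length) (by omega) (by omega),
        List.map_append]
    congr 1
    · apply List.map_congr_left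
      intro i hi
      rw [PySem.List.mem_pyRange_one] at hi
      have hj : i = ((i.toNat : Nat) : Int) := by omega
      rw [hj, slice_one_of_lt s1.toList i.toNat (by omega), slice_one_of_lt s2.toList i.toNat (by omega),
          PySem.List.pyGetD_natCast, PySem.List.pyGetD_natCast,
          List.getD_eq_getElem _ _ (by omega), List.getD_eq_getElem _ _ (by omega)]
    · apply List.map_congr_left
      intro i hi
      rw [PySem.List.mem_pyRange_one] at hi
      have hj : i = ((i.toNat : Nat) : Int) := by omega
      rw [hj, slice_one_of_ge s1.toList i.toNat (by omega), slice_one_of_lt s2.toList i.toNat (by omega),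
          PySem.List.pyGetD_natCast, List.getD_eq_getElem _ _ (by omega)]
  · have hm : min ((s1.toList.length : Int)) ((s2.toList.length : Int)) = s2.toList.length := by omega
    have hn : max ((s1.toList.length : Int)) ((s2.toList.length : Int)) = s1.toList.length := by omega
    rw [hm, hn, PySem.List.pyRange_one_eq_nil (le_refl _), List.map_nil, List.append_nil,
        PySem.List.pyRange_one_append 0 (s2.toList.length) (s1.toList.length) (by omega) (by omega),
        List.map_append]
    congr 1
    · apply List.map_congr_left
      intro i hi
      rw [PySem.List.mem_pyRange_one] at hi
      have hj : i = ((i.toNat : Nat) : Int) := by omega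
      rw [hj, slice_one_of_lt s1.toList i.toNat (by omega), slice_one_of_lt s2.toList i.toNat (by omega),
          PySem.List.pyGetD_natCast, PySem.List.pyGetD_natCast,
          List.getD_eq_getElem _ _ (by omega), List.getD_eq_getElem _ _ (by omega)]
    · apply List.map_congr_left
      intro i hi
      rw [PySem.List.mem_pyRange_one] at hi
      have hj : i = ((i.toNat : Nat) : Int) := by omega
      rw [hj, slice_one_of_lt s1.toList i.toNat (by omega), slice_one_of_ge s2.toList i.toNat (by omega),
          PySem.List.pyGetD_natCast, List.getD_eq_getElem _ _ (by omega)]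

-- ===== VERDICT (by name: the statement is the Claim_ definition above) =====
theorem compactar_strings_spec : Claim_equal_compactar_strings := by
  intro s1 s2 _
  unfold Spec_compactar_strings
  exact compactar_eq s1 s2
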